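-- pv_equiv track=rewrite | github.com/JoshStothfang/PunnettSquare | Genotype.py | generateAlleleCombos
-- ===== SOURCE A (Python) =====
-- def generateAlleleCombos(alleles):
--     alleleCombos = []
--     alleleComboIndices = ["024", "025", "034", "035", "124", "125", "134", "135"]
--
--     for indices in alleleComboIndices:
--         alleleCombo = ""
--         for index in indices:
--             alleleCombo += alleles[int(index)]
--         alleleCombos.append(alleleCombo)
--
--     return alleleCombos
-- ===== SOURCE B (Python) =====
-- def generateAlleleCombos(alleles):
--     # Staged Cartesian-product expansion: extend partial combos one gene at a time.
--     combos = [""]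
--     for pair in ((0, 1), (2, 3), (4, 5)):
--         combos = [combo + alleles[i] for combo in combos for i in pair]
--     return combos
-- ===== Notes on version B (the rewrite author's own statement) =====
-- stated objective: alternative
-- what changed: Replaced the flat loop over eight hardcoded index strings (with per-character int() parsing) by a staged Cartesian-product expansion that starts from [""] and, for each gene's index pair, extends every partial combo with both alleles, building the eight strings level by level.
import Mathlib
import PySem

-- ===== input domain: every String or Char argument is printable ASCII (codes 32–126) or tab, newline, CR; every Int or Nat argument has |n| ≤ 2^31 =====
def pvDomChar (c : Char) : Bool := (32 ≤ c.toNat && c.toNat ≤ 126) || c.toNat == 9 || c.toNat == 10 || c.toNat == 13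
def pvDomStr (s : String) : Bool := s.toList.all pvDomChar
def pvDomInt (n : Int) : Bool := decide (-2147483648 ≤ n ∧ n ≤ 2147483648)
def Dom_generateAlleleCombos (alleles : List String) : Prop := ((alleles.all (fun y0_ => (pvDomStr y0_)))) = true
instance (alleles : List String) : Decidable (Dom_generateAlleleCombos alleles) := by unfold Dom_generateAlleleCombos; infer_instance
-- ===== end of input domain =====

-- B replaces the flat loop over eight hardcoded index strings by a staged Cartesian-product
-- expansion that extends partial combos one gene (index pair) at a time; same list, same order.

-- ===== PORT A =====
def generateAlleleCombos (alleles : List String) : List String :=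
  let alleleComboIndices := ["024", "025", "034", "035", "124", "125", "134", "135"]
  alleleComboIndices.foldl (fun alleleCombos indices =>
    alleleCombos ++ [indices.toList.foldl (fun alleleCombo c =>
      alleleCombo ++ PySem.List.pyGetD alleles ((PySem.Int.ofStr? (String.ofList [c])).getD 0) "") ""]) []

-- ===== PORT B =====
def generateAlleleCombos_alt (alleles : List String) : List String :=
  ([[0, 1], [2, 3], [4, 5]] : List (List Int)).foldl
    (fun combos pair =>
      combos.flatMap (fun combo => pair.map (fun i => combo ++ PySem.List.pyGetD alleles i "")))
    [""]

-- ===== PRECONDITION & SPEC =====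
-- A indexes alleles[0]..alleles[5], so it raises IndexError when the list has fewer than 6 elements.
def Pre_generateAlleleCombos (alleles : List String) : Prop := 6 ≤ alleles.length
instance (alleles : List String) : Decidable (Pre_generateAlleleCombos alleles) := by unfold Pre_generateAlleleCombos; infer_instance
def pvWitness_generateAlleleCombos : List String := ["A", "a", "B", "b", "C", "c"]
def Spec_generateAlleleCombos (alleles : List String) (out : List String) : Prop := out = generateAlleleCombos_alt alleles
instance (alleles : List String) (out : List String) : Decidable (Spec_generateAlleleCombos alleles out) := by unfold Spec_generateAlleleCombos; infer_instance

-- ===== CLAIM (what is proved, stated in full; the proofs are below) =====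
def Claim_equal_generateAlleleCombos : Prop := ∀ (alleles : List String), Dom_generateAlleleCombos alleles → Pre_generateAlleleCombos alleles → Spec_generateAlleleCombos alleles (generateAlleleCombos alleles)

-- ===== LEMMAS AND PROOFS =====
theorem toList_lit (s : String) (cs : List Char) (h : s.toList = cs) : s.toList = cs := h

theorem ofStr_digit (c : Char) (n : Int) (h : PySem.Int.ofStr? (String.ofList [c]) = some n) :
    (PySem.Int.ofStr? (String.ofList [c])).getD 0 = n := by rw [h]; rfl

theorem gac_eq (a b c d e f : String) (rest : List String) :
    generateAlleleCombos (a :: b :: c :: d :: e :: f :: rest) =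
    generateAlleleCombos_alt (a :: b :: c :: d :: e :: f :: rest) := by
  simp only [generateAlleleCombos, generateAlleleCombos_alt,
    toList_lit "024" ['0','2','4'] (by decide), toList_lit "025" ['0','2','5'] (by decide),
    toList_lit "034" ['0','3','4'] (by decide), toList_lit "035" ['0','3','5'] (by decide),
    toList_lit "124" ['1','2','4'] (by decide), toList_lit "125" ['1','2','5'] (by decide),
    toList_lit "134" ['1','3','4'] (by decide), toList_lit "135" ['1','3','5'] (by decide),
    List.foldl, List.flatMap, List.map,
    ofStr_digit '0' 0 (by decide), ofStr_digit '1' 1 (by decide), ofStr_digit '2' 2 (by decide),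
    ofStr_digit '3' 3 (by decide), ofStr_digit '4' 4 (by decide), ofStr_digit '5' 5 (by decide)]
  simp [PySem.List.pyGetD, PySem.List.pyGet?, PySem.List.pyIdx?]

-- ===== VERDICT (by name: the statement is the Claim_ definition above) =====
theorem generateAlleleCombos_spec : Claim_equal_generateAlleleCombos := by
  intro alleles _ hpre
  unfold Pre_generateAlleleCombos at hpre
  match alleles, hpre with
  | a :: b :: c :: d :: e :: f :: rest, _ => exact gac_eq a b c d e f rest
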